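-- pv_equiv track=rewrite | github.com/yuvika022/100DaysOfCode-2025 | DSA/Muskan_590015043/Day6_Q3.py | len_subarray
-- ===== SOURCE A (Python) =====
-- def len_subarray(nums):
--     new = []
--     for i in range(len(nums)-1,0,-1):
--         if nums[i]==nums[i-1]+1:
--             new.append(0)
--         else:
--             new.append(1)
--     count = 0
--     for j in new:
--         if j == 0:
--             count = count+1
--         elif j == 1:
--             break
--     return count+1
-- ===== SOURCE B (Python) =====
-- def len_subarray(nums):
--     run = 1
--     for i in range(1, len(nums)):
--         if nums[i] == nums[i - 1] + 1:
--             run = run + 1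
--         else:
--             run = 1
--     return run
-- ===== Notes on version B (the rewrite author's own statement) =====
-- stated objective: simpler
-- what changed: Replaced A's backward-built 0/1 marker list plus a separate count-until-break scan with a single forward pass maintaining a reset run-length accumulator.
import Mathlib
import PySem

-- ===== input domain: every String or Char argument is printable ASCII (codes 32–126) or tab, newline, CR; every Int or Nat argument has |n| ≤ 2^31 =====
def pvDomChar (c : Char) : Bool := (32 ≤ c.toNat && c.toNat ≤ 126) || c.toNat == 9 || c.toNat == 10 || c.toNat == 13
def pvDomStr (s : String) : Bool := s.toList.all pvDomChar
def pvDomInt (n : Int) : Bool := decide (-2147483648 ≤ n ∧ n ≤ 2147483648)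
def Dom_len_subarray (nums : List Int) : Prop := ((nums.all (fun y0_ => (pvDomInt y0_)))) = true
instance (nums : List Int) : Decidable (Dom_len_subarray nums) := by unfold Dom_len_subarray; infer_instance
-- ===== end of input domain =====

-- B replaces A's backward 0/1 marker list plus a count-until-break scan with a single
-- forward pass maintaining a reset run accumulator (objective: simpler; same O(n) cost).

-- ===== PORT A =====
-- the second Python loop (with its 'break') as structural recursion over the built list
def lsCountLoop : List Int → Int → Int
  | [], count => count
  | j :: rest, count =>
    if j = 0 then lsCountLoop rest (count + 1)
    else if j = 1 then count
    else lsCountLoop rest count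

-- nums[i] / nums[i-1] ported as pyGetD … 0: every index the range produces is in bounds, so this is exact
def len_subarray (nums : List Int) : Int :=
  let new := (PySem.List.pyRange ((nums.length : Int) - 1) 0 (-1)).foldl
    (fun acc i =>
      if PySem.List.pyGetD nums i 0 = PySem.List.pyGetD nums (i - 1) 0 + 1
      then acc ++ [(0 : Int)] else acc ++ [(1 : Int)]) []
  lsCountLoop new 0 + 1

-- ===== PORT B =====
def len_subarray_alt (nums : List Int) : Int :=
  (PySem.List.pyRange 1 (nums.length : Int) 1).foldl
    (fun run i =>
      if PySem.List.pyGetD nums i 0 = PySem.List.pyGetD nums (i - 1) 0 + 1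
      then run + 1 else 1) 1

-- ===== PRECONDITION & SPEC =====
def Spec_len_subarray (nums : List Int) (out : Int) : Prop := out = len_subarray_alt nums
instance (nums : List Int) (out : Int) : Decidable (Spec_len_subarray nums out) := by unfold Spec_len_subarray; infer_instance

-- ===== CLAIM (what is proved, stated in full; the proofs are below) =====
def Claim_equal_len_subarray : Prop := ∀ (nums : List Int), Dom_len_subarray nums → Spec_len_subarray nums (len_subarray nums)

-- ===== LEMMAS AND PROOFS =====

-- length of the consecutive-increasing run ending at index m (the shared spec)
def lsSfx (nums : List Int) : Nat → Int
  | 0 => 1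
  | m + 1 =>
    if PySem.List.pyGetD nums ((m : Int) + 1) 0
        = PySem.List.pyGetD nums (((m : Int) + 1) - 1) 0 + 1
    then lsSfx nums m + 1 else 1

theorem ls_foldl_push (C : Int → Prop) [DecidablePred C] :
    ∀ (l : List Int) (acc : List Int),
      l.foldl (fun a i => if C i then a ++ [(0:Int)] else a ++ [(1:Int)]) acc
        = acc ++ l.map (fun i => if C i then 0 else 1) := by
  intro l
  induction l with
  | nil => simp
  | cons x xs ih => intro acc; by_cases h : C x <;> simp [h, ih]

theorem ls_count (nums : List Int) :
    ∀ (m : Nat) (c : Int),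
      lsCountLoop
        ((PySem.List.pyRange (m : Int) 0 (-1)).map
          (fun i => if PySem.List.pyGetD nums i 0 = PySem.List.pyGetD nums (i - 1) 0 + 1
                    then (0:Int) else 1)) c
        = c + lsSfx nums m - 1 := by
  intro m
  induction m with
  | zero =>
    intro c
    rw [PySem.List.pyRange_neg_one_eq_nil (by norm_num)]
    simp [lsCountLoop, lsSfx]
  | succ m ih =>
    intro c
    rw [PySem.List.pyRange_neg_one_cons (by exact_mod_cast Nat.succ_pos m)]
    by_cases h : PySem.List.pyGetD nums ((m : Int) + 1) 0
        = PySem.List.pyGetD nums (((m : Int) + 1) - 1) 0 + 1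
    · have : ((m + 1 : Nat) : Int) = (m : Int) + 1 := by push_cast; ring
      simp only [List.map_cons, this, lsCountLoop, if_pos h, if_neg (by norm_num : ¬ (0:Int) = 1)]
      rw [show ((m : Int) + 1 - 1) = (m : Int) by ring, ih]
      simp only [lsSfx, if_pos h]
      simp
      ring
    · have : ((m + 1 : Nat) : Int) = (m : Int) + 1 := by push_cast; ring
      simp only [List.map_cons, this, lsCountLoop, if_neg h,
        if_neg (by norm_num : ¬ (1:Int) = 0)]
      simp only [lsSfx, if_neg h]
      simp

theorem ls_run (nums : List Int) :
    ∀ (m : Nat),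
      (PySem.List.pyRange 1 ((m : Int) + 1) 1).foldl
        (fun run i =>
          if PySem.List.pyGetD nums i 0 = PySem.List.pyGetD nums (i - 1) 0 + 1
          then run + 1 else 1) 1
        = lsSfx nums m := by
  intro m
  induction m with
  | zero => rw [show ((0:Nat):Int) + 1 = 0 + 1 by norm_num,
      PySem.List.pyRange_one_eq_nil (by norm_num)]; simp [lsSfx]
  | succ m ih =>
    rw [show ((m + 1 : Nat) : Int) + 1 = ((m : Int) + 1) + 1 by push_cast; ring,
      PySem.List.pyRange_one_succ_right (by omega)]
    rw [List.foldl_append, ih]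
    simp [lsSfx]

theorem ls_main (nums : List Int) : len_subarray nums = len_subarray_alt nums := by
  simp only [len_subarray, len_subarray_alt]
  rw [ls_foldl_push]
  cases hn : nums.length with
  | zero =>
    rw [PySem.List.pyRange_neg_one_eq_nil (by norm_num),
      PySem.List.pyRange_one_eq_nil (by norm_num)]
    simp [lsCountLoop]
  | succ k =>
    rw [show ((k + 1 : Nat) : Int) - 1 = (k : Int) by push_cast; ring]
    rw [show ((k + 1 : Nat) : Int) = (k : Int) + 1 by push_cast; ring]
    rw [ls_run nums k]
    simp only [List.nil_append]
    rw [ls_count nums k 0]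
    ring

-- ===== VERDICT (by name: the statement is the Claim_ definition above) =====
theorem len_subarray_spec : Claim_equal_len_subarray := by
  intro nums _
  unfold Spec_len_subarray
  exact ls_main nums
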